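-- pv_equiv track=rewrite | github.com/michelebastione/brainf-ck | brainfuck_compiler.py | find_bracket_match
-- ===== SOURCE A (Python) =====
-- def find_bracket_match (string):
--     count = 0
--     for i in range(len(string)):
--         if string[i] == '[':
--             count += 1
--         if string[i] == ']':
--             if count == 0:
--                 return i
--             count -=1
-- ===== SOURCE B (Python) =====
-- def find_bracket_match(string):
--     # build the running bracket-balance sequence, then return the first
--     # index where the balance goes negative (first unmatched ']')
--     balances = []
--     b = 0
--     for c in string:
--         b += (c == '[') - (c == ']')
--         balances.append(b)
--     for i, b in enumerate(balances):
--         if b < 0: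
--             return i
-- ===== Notes on version B (the rewrite author's own statement) =====
-- stated objective: alternative
-- what changed: Replaces the guarded counter ('if count==0 return else decrement') by building a prefix-sum balance sequence (+1 for '[', -1 for ']') and scanning it for the first negative entry.
import Mathlib
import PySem

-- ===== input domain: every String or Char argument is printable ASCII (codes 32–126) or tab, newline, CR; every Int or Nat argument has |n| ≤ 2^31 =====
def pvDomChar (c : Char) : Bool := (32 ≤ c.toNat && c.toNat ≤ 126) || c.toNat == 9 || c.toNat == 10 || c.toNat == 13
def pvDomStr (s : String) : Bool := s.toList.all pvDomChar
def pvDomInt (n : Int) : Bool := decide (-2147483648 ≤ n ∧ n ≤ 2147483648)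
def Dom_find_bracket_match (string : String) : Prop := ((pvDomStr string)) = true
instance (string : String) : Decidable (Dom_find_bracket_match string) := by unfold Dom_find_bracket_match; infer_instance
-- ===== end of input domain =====

-- B replaces A's guarded counter by a prefix-sum balance list scanned for its first negative entry (alternative decomposition, same cost).


-- ===== PORT A =====
-- loop over the characters with index i and counter `count`, as in A
def faLoop : List Char → Int → Int → Option Int
  | [], _, _ => none
  | c :: cs, i, count =>
    let count1 := if c = '[' then count + 1 else count
    if c = ']' then
      if count1 = 0 then some i else faLoop cs (i + 1) (count1 - 1)
    else faLoop cs (i + 1) count1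

def find_bracket_match (string : String) : Option Int :=
  faLoop string.toList 0 0

-- ===== PORT B =====
-- first pass of Source B: the running balance sequence
def fbBal : List Char → Int → List Int
  | [], _ => []
  | c :: cs, b =>
    let b1 := b + (if c = '[' then 1 else 0) - (if c = ']' then 1 else 0)
    b1 :: fbBal cs b1

-- second pass of Source B: index of the first negative balance
def fbScan : List Int → Int → Option Int
  | [], _ => none
  | b :: bs, i => if b < 0 then some i else fbScan bs (i + 1)

def find_bracket_match_alt (string : String) : Option Int :=
  fbScan (fbBal string.toList 0) 0

-- ===== PRECONDITION & SPEC =====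
def Spec_find_bracket_match (string : String) (out : Option Int) : Prop := out = find_bracket_match_alt string
instance (string : String) (out : Option Int) : Decidable (Spec_find_bracket_match string out) := by unfold Spec_find_bracket_match; infer_instance

-- ===== CLAIM (what is proved, stated in full; the proofs are below) =====
def Claim_equal_find_bracket_match : Prop := ∀ (string : String), Dom_find_bracket_match string → Spec_find_bracket_match string (find_bracket_match string)

-- ===== LEMMAS AND PROOFS =====
-- invariant: with a nonnegative counter, A's loop equals B's scan of the balances started at that counter
theorem faLoop_eq_scan (cs : List Char) (i count : Int) (h : 0 ≤ count) :
    faLoop cs i count = fbScan (fbBal cs count) i := by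
  induction cs generalizing i count with
  | nil => rfl
  | cons c cs ih =>
    by_cases h1 : c = '['
    · subst h1
      simp only [faLoop, fbBal, fbScan, reduceIte, Char.reduceEq]
      rw [if_neg (by omega), ih _ _ (by omega)]
      norm_num
    · by_cases h2 : c = ']'
      · subst h2
        simp only [faLoop, fbBal, fbScan, reduceIte, Char.reduceEq]
        by_cases h3 : count = 0
        · rw [if_pos h3, if_pos (by omega)]
        · rw [if_neg h3, if_neg (by omega), ih _ _ (by omega)]
          norm_num
      · simp only [faLoop, fbBal, fbScan, if_neg h1, if_neg h2]
        rw [if_neg (by omega), ih _ _ h]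
        norm_num

-- ===== VERDICT (by name: the statement is the Claim_ definition above) =====
theorem find_bracket_match_spec : Claim_equal_find_bracket_match := by
  intro s _
  unfold Spec_find_bracket_match find_bracket_match find_bracket_match_alt
  exact faLoop_eq_scan _ 0 0 le_rfl
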